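-- pv_equiv track=rewrite | github.com/Rahulnisanth/Complete-Python-Hub | Leetcode-Practice/Ace-75s/HashMap.py | equalPairs
-- ===== SOURCE A (Python) =====
-- def equalPairs(grid) -> int:
--     if not grid:
--         return 0
--     def helper(grid, row, col):
--         row_list = grid[row]
--         col_list = [grid[i][col] for i in range(len(grid))]
--         return row_list, col_list
--     # Main drive...
--     count = 0
--     for i in range(len(grid)):
--         for j in range(len(grid[i])):
--             row_list, col_list = helper(grid, i, j)
--             if row_list == col_list:
--                 count += 1
--     return count
-- ===== SOURCE B (Python) =====
-- def equalPairs(grid) -> int: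
--     if not grid:
--         return 0
--     counts = {}
--     for row in grid:
--         key = tuple(row)
--         counts[key] = counts.get(key, 0) + 1
--     total = 0
--     for j in range(len(grid[0])):
--         col = tuple(row[j] for row in grid)
--         total += counts.get(col, 0)
--     return total
-- ===== Notes on version B (the rewrite author's own statement) =====
-- stated objective: faster
-- what changed: Replaces the triple loop (rebuilding each column for every cell) by hashing each row into a counter once and looking up each column tuple, O(n^2) instead of O(n^3).
import Mathlib
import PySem

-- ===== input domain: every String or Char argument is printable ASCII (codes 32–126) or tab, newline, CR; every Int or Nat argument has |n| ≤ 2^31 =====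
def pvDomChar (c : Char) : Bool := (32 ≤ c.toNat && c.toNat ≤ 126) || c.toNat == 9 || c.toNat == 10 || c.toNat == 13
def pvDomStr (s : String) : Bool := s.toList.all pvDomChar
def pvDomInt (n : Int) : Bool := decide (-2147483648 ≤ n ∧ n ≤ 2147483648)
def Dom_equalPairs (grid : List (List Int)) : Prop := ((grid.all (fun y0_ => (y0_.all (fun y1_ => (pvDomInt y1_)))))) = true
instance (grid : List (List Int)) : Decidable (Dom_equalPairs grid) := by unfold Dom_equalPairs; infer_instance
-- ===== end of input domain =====

-- B replaces A's cubic triple loop (rebuilding each column for every cell) by a row counter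
-- (one dict pass) plus one column pass with lookups: an asymptotically faster algorithm.


-- ===== PORT A =====
-- helper(grid, row, col) → (row_list, col_list)
def eqHelper (grid : List (List Int)) (row col : Int) : List Int × List Int :=
  (PySem.List.pyGetD grid row [],
   (PySem.List.pyRange 0 (grid.length : Int)).map
     (fun i => PySem.List.pyGetD (PySem.List.pyGetD grid i []) col 0))

def equalPairs (grid : List (List Int)) : Int :=
  if grid = [] then 0
  else
    (PySem.List.pyRange 0 (grid.length : Int)).foldl
      (fun count i =>
        (PySem.List.pyRange 0 ((PySem.List.pyGetD grid i []).length : Int)).foldl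
          (fun count j =>
            let p := eqHelper grid i j
            if p.1 = p.2 then count + 1 else count)
          count)
      0

-- ===== PORT B =====
def equalPairs_alt (grid : List (List Int)) : Int :=
  if grid = [] then 0
  else
    let counts : PySem.Dict (List Int) Int :=
      grid.foldl (fun d row => d.insert row (d.getD row 0 + 1)) PySem.Dict.empty
    (PySem.List.pyRange 0 ((PySem.List.pyGetD grid 0 []).length : Int)).foldl
      (fun total j =>
        total + counts.getD (grid.map (fun row => PySem.List.pyGetD row j 0)) 0)
      0

-- ===== PRECONDITION & SPEC =====
-- Pre_ excludes exactly the ragged grids (two rows of different lengths): there the Python A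
-- raises IndexError while building a column.
def Pre_equalPairs (grid : List (List Int)) : Prop :=
  ∀ row ∈ grid, row.length = (grid.headD []).length
instance (grid : List (List Int)) : Decidable (Pre_equalPairs grid) := by
  unfold Pre_equalPairs; infer_instance

def pvWitness_equalPairs : List (List Int) := [[3, 2, 1], [1, 7, 6], [2, 7, 7]]

def Spec_equalPairs (grid : List (List Int)) (out : Int) : Prop := out = equalPairs_alt grid
instance (grid : List (List Int)) (out : Int) : Decidable (Spec_equalPairs grid out) := by
  unfold Spec_equalPairs; infer_instance

-- ===== CLAIM (what is proved, stated in full; the proofs are below) =====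
def Claim_equal_equalPairs : Prop :=
  ∀ (grid : List (List Int)), Dom_equalPairs grid → Pre_equalPairs grid →
    Spec_equalPairs grid (equalPairs grid)

-- ===== LEMMAS AND PROOFS =====

-- the column at index j, as both ports end up computing it
def pvCol (grid : List (List Int)) (j : Int) : List Int :=
  grid.map (fun row => PySem.List.pyGetD row j 0)

theorem pvCol_eq (grid : List (List Int)) (j : Int) :
    (PySem.List.pyRange 0 (grid.length : Int)).map
      (fun i => PySem.List.pyGetD (PySem.List.pyGetD grid i []) j 0) = pvCol grid j := by
  have h := PySem.List.map_pyGetD_pyRange_zero' grid []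
  calc (PySem.List.pyRange 0 (grid.length : Int)).map
        (fun i => PySem.List.pyGetD (PySem.List.pyGetD grid i []) j 0)
      = ((PySem.List.pyRange 0 (grid.length : Int)).map
          (fun i => PySem.List.pyGetD grid i [])).map
          (fun row => PySem.List.pyGetD row j 0) := by
        rw [List.map_map]; rfl
    _ = pvCol grid j := by rw [h]; rfl

-- 'for j …: if y = f j: c += 1' is c + count of y among the f j
theorem pv_foldl_ite_count {α : Type} (l : List α) (f : α → List Int) (y : List Int) (c : Int) :
    l.foldl (fun c x => if y = f x then c + 1 else c) c = c + ((l.map f).count y : Int) := by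
  induction l generalizing c with
  | nil => simp
  | cons x xs ih =>
    simp only [List.foldl_cons, List.map_cons, List.count_cons, ih]
    by_cases h : y = f x
    · simp [h]; ring
    · have hb : ¬ (f x == y) := by simp [beq_iff_eq]; exact fun e => h e.symm
      simp [h, hb]

-- double counting: Σ_{x∈xs} count x ys = Σ_{y∈ys} count y xs
theorem pv_count_symm (xs ys : List (List Int)) :
    (xs.map (fun x => ((ys.count x : Nat) : Int))).sum
      = (ys.map (fun y => ((xs.count y : Nat) : Int))).sum := by
  induction xs with
  | nil => simp
  | cons x xs ih =>
    simp only [List.map_cons, List.sum_cons, ih]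
    have hsplit : (ys.map (fun y => (((x :: xs).count y : Nat) : Int))).sum
        = (ys.map (fun y => ((xs.count y : Nat) : Int) + (if (x == y) then 1 else 0))).sum := by
      apply congrArg
      apply List.map_congr_left
      intro y _
      rw [List.count_cons]
      push_cast
      ring
    rw [hsplit, PySem.List.sum_map_add_int ys (fun y => ((xs.count y : Nat) : Int))
          (fun y => (if (x == y) then 1 else 0)),
        PySem.List.sum_map_ite_one_zero (fun y => x == y) ys]
    have : ys.countP (fun y => x == y) = ys.count x := by
      apply List.countP_congr; intro y _
      cases hb : x == y <;> cases hb2 : y == x <;> simp_all [beq_iff_eq]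
    rw [this]; ring

theorem eqHelper_ite (grid : List (List Int)) (i j c : Int) :
    (let p := eqHelper grid i j
     if p.1 = p.2 then c + 1 else c)
    = (if PySem.List.pyGetD grid i []
            = (PySem.List.pyRange 0 (grid.length : Int)).map
                (fun k => PySem.List.pyGetD (PySem.List.pyGetD grid k []) j 0)
         then c + 1 else c) := rfl

theorem equalPairs_eq_sum (grid : List (List Int)) (hne : grid ≠ [])
    (hpre : Pre_equalPairs grid) :
    equalPairs grid
      = (grid.map (fun row =>
          ((((PySem.List.pyRange 0 ((grid.headD []).length : Int)).map
              (pvCol grid)).count row : Nat) : Int))).sum := by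
  unfold equalPairs
  rw [if_neg hne]
  simp only [eqHelper_ite]
  rw [PySem.List.foldl_pyRange_zero_pyGetD' grid []
        (fun (count : Int) (row : List Int) =>
          (PySem.List.pyRange 0 ((row.length : Nat) : Int)).foldl
            (fun count j =>
              if row
                  = (PySem.List.pyRange 0 (grid.length : Int)).map
                      (fun k => PySem.List.pyGetD (PySem.List.pyGetD grid k []) j 0)
                then count + 1 else count) count) 0]
  rw [PySem.List.foldl_congr_mem _ _
        (fun (count : Int) (row : List Int) =>
          count + ((((PySem.List.pyRange 0 ((grid.headD []).length : Int)).map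
              (pvCol grid)).count row : Nat) : Int)) 0 ?_]
  · rw [PySem.List.foldl_add]; ring
  · intro acc row hrow
    simp only [pvCol_eq]
    rw [hpre row hrow, pv_foldl_ite_count]

theorem equalPairs_alt_eq_sum (grid : List (List Int)) (hne : grid ≠ []) :
    equalPairs_alt grid
      = (((PySem.List.pyRange 0 ((grid.headD []).length : Int)).map
            (pvCol grid)).map (fun col => ((grid.count col : Nat) : Int))).sum := by
  unfold equalPairs_alt
  rw [if_neg hne]
  dsimp only
  simp only [PySem.Dict.foldl_insert_getD_add_one_eq_counter, PySem.Dict.getD_counter]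
  have h0 : PySem.List.pyGetD grid 0 [] = grid.headD [] := by
    rw [PySem.List.pyGetD_zero]
    cases grid with
    | nil => rfl
    | cons a l => rfl
  rw [h0, PySem.List.foldl_add]
  simp [List.map_map, pvCol, Function.comp_def]

-- ===== VERDICT (by name: the statement is the Claim_ definition above) =====
theorem equalPairs_spec : Claim_equal_equalPairs := by
  intro grid _ hpre
  unfold Spec_equalPairs
  by_cases hne : grid = []
  · subst hne; rfl
  · rw [equalPairs_eq_sum grid hne hpre, equalPairs_alt_eq_sum grid hne,
        pv_count_symm]
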